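-- pv_equiv track=rewrite | github.com/Nguyenthang2292/Sovereign-IQ | web/shared/utils/translations.py | get_locale_from_header
-- ===== SOURCE A (Python) =====
-- from typing import Dict, Optional
--
-- DEFAULT_LOCALE = "en"
--
-- SUPPORTED_LOCALES = ["en", "vi"]
--
-- def get_locale_from_header(accept_language: Optional[str]) -> str:
--     """
--     Extract locale from Accept-Language header.
--
--     Args:
--         accept_language: Accept-Language header value (e.g., "vi,en;q=0.9")
--
--     Returns:
--         Locale code (default: "en")
--     """
--     if not accept_language:
--         return DEFAULT_LOCALE
--
--     # Parse Accept-Language header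
--     # Format: "vi,en;q=0.9" -> ["vi", "en"]
--     languages = accept_language.split(",")
--     for lang in languages:
--         # Extract language code (e.g., "vi" from "vi;q=0.9")
--         lang_code = lang.split(";")[0].strip().lower()
--         # Check if it's a supported locale or starts with a supported locale
--         for supported in SUPPORTED_LOCALES:
--             if lang_code == supported or lang_code.startswith(f"{supported}-"):
--                 return supported
--
--     return DEFAULT_LOCALE
-- ===== SOURCE B (Python) =====
-- from typing import Optional
--
-- DEFAULT_LOCALE = "en"
--
-- SUPPORTED_LOCALES = ["en", "vi"]
--
-- _SUPPORTED = set(SUPPORTED_LOCALES)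
--
-- def get_locale_from_header(accept_language: Optional[str]) -> str:
--     if not accept_language:
--         return DEFAULT_LOCALE
--     for lang in accept_language.split(","):
--         code = lang.split(";")[0].strip().lower()
--         base = code.split("-")[0]
--         if base in _SUPPORTED:
--             return base
--     return DEFAULT_LOCALE
-- ===== Notes on version B (the rewrite author's own statement) =====
-- stated objective: simpler
-- what changed: Replaces the inner scan over SUPPORTED_LOCALES (equality-or-prefix test per supported locale) by computing each token's base code once (split on the dash) and doing a single set-membership test per token.
import Mathlib
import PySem

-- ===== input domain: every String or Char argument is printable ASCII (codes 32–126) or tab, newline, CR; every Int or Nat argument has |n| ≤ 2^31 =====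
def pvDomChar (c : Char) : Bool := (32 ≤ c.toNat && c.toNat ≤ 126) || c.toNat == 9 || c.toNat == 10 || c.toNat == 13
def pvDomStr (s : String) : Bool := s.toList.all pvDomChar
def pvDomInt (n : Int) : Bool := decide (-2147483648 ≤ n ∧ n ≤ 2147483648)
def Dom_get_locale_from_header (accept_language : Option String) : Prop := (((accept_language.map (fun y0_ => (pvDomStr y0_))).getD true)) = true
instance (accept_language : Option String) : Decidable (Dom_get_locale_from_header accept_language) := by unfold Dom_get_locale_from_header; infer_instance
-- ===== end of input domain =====

-- B replaces A's inner scan over the supported locales (with its '== or startswith' test)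
-- by a single set-membership test on the token's base code (split on '-'): simpler, same behaviour.

-- ===== PORT A =====
def pvSupportedLocales : List String := ["en", "vi"]

-- inner `for supported in SUPPORTED_LOCALES` loop: first matching supported locale, if any
def pvInnerA (code : String) : List String → Option String
  | [] => none
  | s :: rest =>
    if code = s ∨ PySem.Str.startswith code (s ++ "-") then some s
    else pvInnerA code rest

-- `return supported` on a match, otherwise fall through to the rest of the outer loop
def pvPickA (r : Option String) (fallback : String) : String :=
  match r with
  | some s => s
  | none => fallback

-- outer `for lang in languages` loop
def pvLoopA : List String → String
  | [] => "en"
  | lang :: rest =>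
    let code := PySem.Str.lower (PySem.Str.strip (((PySem.Str.split? lang ";").getD []).headD ""))
    pvPickA (pvInnerA code pvSupportedLocales) (pvLoopA rest)

def get_locale_from_header (accept_language : Option String) : String :=
  match accept_language with
  | none => "en"
  | some s => if s = "" then "en" else pvLoopA ((PySem.Str.split? s ",").getD [])

-- ===== PORT B =====
def pvSupportedSet : PySem.Set String := PySem.Set.ofList ["en", "vi"]

def pvLoopB : List String → String
  | [] => "en"
  | lang :: rest =>
    let code := PySem.Str.lower (PySem.Str.strip (((PySem.Str.split? lang ";").getD []).headD ""))
    -- code.split("-")[0]: sep is nonempty so split? is some and the list is nonempty; [0] = headD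
    let base := ((PySem.Str.split? code "-").getD []).headD ""
    if pvSupportedSet.contains base then base else pvLoopB rest

def get_locale_from_header_alt (accept_language : Option String) : String :=
  match accept_language with
  | none => "en"
  | some s => if s = "" then "en" else pvLoopB ((PySem.Str.split? s ",").getD [])

-- ===== PRECONDITION & SPEC =====
def Spec_get_locale_from_header (accept_language : Option String) (out : String) : Prop := out = get_locale_from_header_alt accept_language
instance (accept_language : Option String) (out : String) : Decidable (Spec_get_locale_from_header accept_language out) := by unfold Spec_get_locale_from_header; infer_instance

-- ===== CLAIM (what is proved, stated in full; the proofs are below) =====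
def Claim_equal_get_locale_from_header : Prop := ∀ (accept_language : Option String), Dom_get_locale_from_header accept_language → Spec_get_locale_from_header accept_language (get_locale_from_header accept_language)

-- ===== LEMMAS AND PROOFS =====

-- splitOn.go appends the reversed accumulator in front
theorem pv_go_acc (sep : List Char) (fuel : Nat) (l cur : List Char) (acc : List (List Char)) :
    PySem.Chars.splitOn.go sep fuel l cur acc
      = acc.reverse ++ PySem.Chars.splitOn.go sep fuel l cur [] := by
  induction fuel generalizing l cur acc with
  | zero => simp [PySem.Chars.splitOn.go]
  | succ n ih =>
    cases l with
    | nil => simp [PySem.Chars.splitOn.go]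
    | cons c rest =>
      simp only [PySem.Chars.splitOn.go]
      by_cases h : sep.isPrefixOf (c :: rest) = true
      · simp only [h, if_true]
        rw [ih _ _ (cur.reverse :: acc), ih _ _ [cur.reverse]]
        simp
      · simp only [h]
        exact ih _ _ acc

-- the first piece produced by splitOn.go with a single-char separator
theorem pv_go_head (fuel : Nat) (l cur : List Char) (h : l.length < fuel) :
    (PySem.Chars.splitOn.go ['-'] fuel l cur []).head?
      = some (cur.reverse ++ l.takeWhile (fun c => !(c == '-'))) := by
  induction fuel generalizing l cur with
  | zero => omega
  | succ n ih =>
    cases l with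
    | nil => simp [PySem.Chars.splitOn.go]
    | cons c rest =>
      simp only [PySem.Chars.splitOn.go]
      by_cases hc : c = '-'
      · have hp : List.isPrefixOf ['-'] (c :: rest) = true := by
          simp [List.isPrefixOf, hc]
        simp only [hp, if_true]
        rw [pv_go_acc _ _ _ _ [cur.reverse]]
        simp [hc]
      · have hp : List.isPrefixOf ['-'] (c :: rest) = false := by
          simp [List.isPrefixOf]; exact fun e => hc e.symm
        simp only [hp, Bool.false_eq_true, if_false]
        rw [ih rest (c :: cur) (by simpa using Nat.lt_of_succ_lt_succ h)]
        simp [hc]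

theorem pv_splitOn_head (cs : List Char) :
    (PySem.Chars.splitOn cs ['-']).head? = some (cs.takeWhile (fun c => !(c == '-'))) := by
  unfold PySem.Chars.splitOn
  simpa using pv_go_head (cs.length + 1) cs [] (by omega)

-- the base code characterised: takeWhile up to '-' equals t iff cs is t or starts with t ++ "-"
theorem pv_takeWhile_eq_iff (t cs : List Char) (ht : '-' ∉ t) :
    cs.takeWhile (fun c => !(c == '-')) = t ↔ cs = t ∨ (t ++ ['-']) <+: cs := by
  have hall : ∀ a ∈ t, (fun c => !(c == '-')) a = true := by
    intro a ha
    simp only [Bool.not_eq_true', beq_eq_false_iff_ne]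
    rintro rfl
    exact ht ha
  constructor
  · intro h
    have hsplit : cs = t ++ cs.dropWhile (fun c => !(c == '-')) := by
      conv_lhs => rw [← List.takeWhile_append_dropWhile (p := fun c => !(c == '-')) (l := cs)]
      rw [h]
    cases hd : cs.dropWhile (fun c => !(c == '-')) with
    | nil => left; simpa [hd] using hsplit
    | cons d ds =>
      have hne : cs.dropWhile (fun c => !(c == '-')) ≠ [] := by simp [hd]
      have hdP := List.head_dropWhile_not (fun c => !(c == '-')) hne
      simp only [hd, List.head_cons] at hdP
      have hdd : d = '-' := by simpa using hdP
      right
      exact ⟨ds, by rw [hsplit, hd, hdd]; simp⟩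
  · rintro (rfl | ⟨u, rfl⟩)
    · exact List.takeWhile_eq_self_iff.mpr hall
    · rw [List.append_assoc, List.takeWhile_append]
      have htw : t.takeWhile (fun c => !(c == '-')) = t :=
        List.takeWhile_eq_self_iff.mpr hall
      simp [htw]

-- A's per-locale test equals B's base-code comparison
theorem pv_match_iff (code s : String) (hs : '-' ∉ s.toList) :
    (code = s ∨ PySem.Str.startswith code (s ++ "-") = true)
      ↔ ((PySem.Str.split? code "-").getD []).headD "" = s := by
  have hchars : PySem.Chars.split? code.toList "-".toList
      = some (PySem.Chars.splitOn code.toList ['-']) := by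
    simp [PySem.Chars.split?]
  have hmap := PySem.Str.split?_map code "-"
  rw [hchars] at hmap
  cases hsp : PySem.Str.split? code "-" with
  | none => rw [hsp] at hmap; simp at hmap
  | some parts =>
    rw [hsp] at hmap
    simp only [Option.map_some, Option.some.injEq] at hmap
    simp only [Option.getD_some]
    have hhead : (parts.headD "").toList = code.toList.takeWhile (fun c => !(c == '-')) := by
      have h1 : (PySem.Chars.splitOn code.toList ['-']).head?
          = some (code.toList.takeWhile (fun c => !(c == '-'))) := pv_splitOn_head _
      rw [← hmap] at h1
      cases parts with
      | nil => simp at h1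
      | cons p ps => simpa using h1
    constructor
    · rintro (rfl | hsw)
      · apply String.ext_iff.mpr
        rw [hhead]
        exact (pv_takeWhile_eq_iff _ _ hs).mpr (Or.inl rfl)
      · apply String.ext_iff.mpr
        rw [hhead]
        apply (pv_takeWhile_eq_iff _ _ hs).mpr
        right
        have := (PySem.Chars.startswith_iff code.toList (s ++ "-").toList).mp (by
          simpa [PySem.Str.startswith_eq] using hsw)
        simpa using this
    · intro hb
      have hb' : code.toList.takeWhile (fun c => !(c == '-')) = s.toList := by
        rw [← hhead, hb]
      rcases (pv_takeWhile_eq_iff _ _ hs).mp hb' with h | h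
      · exact Or.inl (String.ext_iff.mpr h)
      · refine Or.inr ?_
        rw [PySem.Str.startswith_eq]
        exact (PySem.Chars.startswith_iff _ _).mpr (by simpa using h)

theorem pv_set_eq : pvSupportedSet = ["en", "vi"] := by rfl

theorem pv_loop_eq (langs : List String) : pvLoopA langs = pvLoopB langs := by
  induction langs with
  | nil => rfl
  | cons lang rest ih =>
    simp only [pvLoopA, pvLoopB]
    set code := PySem.Str.lower (PySem.Str.strip (((PySem.Str.split? lang ";").getD []).headD "")) with hcode
    set base := ((PySem.Str.split? code "-").getD []).headD "" with hbase
    have hen := pv_match_iff code "en" (by decide)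
    have hvi := pv_match_iff code "vi" (by decide)
    rw [← hbase] at hen hvi
    have hInner : pvInnerA code pvSupportedLocales
        = if code = "en" ∨ PySem.Str.startswith code ("en" ++ "-") = true then some "en"
          else if code = "vi" ∨ PySem.Str.startswith code ("vi" ++ "-") = true then some "vi"
          else none := by
      simp only [pvSupportedLocales, pvInnerA]
    rw [hInner, pv_set_eq]
    by_cases hc1 : code = "en" ∨ PySem.Str.startswith code ("en" ++ "-") = true
    · rw [if_pos hc1, hen.mp hc1]
      simp [pvPickA]
    · rw [if_neg hc1]
      have hb1 : ¬ base = "en" := fun h => hc1 (hen.mpr h)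
      by_cases hc2 : code = "vi" ∨ PySem.Str.startswith code ("vi" ++ "-") = true
      · rw [if_pos hc2, hvi.mp hc2]
        simp [pvPickA]
      · rw [if_neg hc2]
        have hb2 : ¬ base = "vi" := fun h => hc2 (hvi.mpr h)
        simp [pvPickA, hb1, hb2, ih]

-- ===== VERDICT (by name: the statement is the Claim_ definition above) =====
theorem get_locale_from_header_spec : Claim_equal_get_locale_from_header := by
  intro accept_language _
  unfold Spec_get_locale_from_header get_locale_from_header get_locale_from_header_alt
  cases accept_language with
  | none => rfl
  | some s =>
    by_cases h : s = "" <;> simp [h, pv_loop_eq]
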